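-- pv_equiv track=rewrite | github.com/ahmadmostafa10495/Security | BONUS So you think you can HACK.py | cipher_handling
-- ===== SOURCE A (Python) =====
-- def cipher_handling(cipher_text):
--     list_of_tokens = []
--     i=0
--     while(i < (len(cipher_text)-1)):
--             token = cipher_text[i] + cipher_text[i+1]
--             list_of_tokens.append(token)
--             i+=2
--             continue
--     return list_of_tokens
-- ===== SOURCE B (Python) =====
-- def cipher_handling(cipher_text):
--     it = iter(cipher_text)
--     return [a + b for a, b in zip(it, it)]
-- ===== Notes on version B (the rewrite author's own statement) =====
-- stated objective: idiomatic
-- what changed: Replaces the index-stepping while loop with an accumulator by the single-iterator zip grouper idiom (one iterator consumed twice per pair inside a comprehension), which also drops a trailing odd character naturally; the C-level zip/comprehension avoids per-step Python indexing and appends.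
import Mathlib
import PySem

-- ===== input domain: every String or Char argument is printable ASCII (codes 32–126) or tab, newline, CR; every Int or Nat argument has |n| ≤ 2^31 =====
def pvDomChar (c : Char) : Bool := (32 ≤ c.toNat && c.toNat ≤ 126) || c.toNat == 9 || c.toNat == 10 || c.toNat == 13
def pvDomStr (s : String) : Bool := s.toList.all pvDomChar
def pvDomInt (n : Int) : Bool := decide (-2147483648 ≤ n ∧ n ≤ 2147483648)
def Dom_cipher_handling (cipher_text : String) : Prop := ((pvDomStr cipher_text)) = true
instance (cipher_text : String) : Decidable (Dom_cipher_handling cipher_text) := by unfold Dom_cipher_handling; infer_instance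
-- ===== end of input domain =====

-- B replaces A's index-stepping while loop by structural pairing of consecutive characters (idiomatic; same cost).
-- ===== PORT A =====
-- A's while loop: index i starting at 0, 'while i < len-1: append s[i]+s[i+1]; i += 2'.
-- The Nat guard 'i + 1 < cs.length' is Python's 'i < len(cipher_text) - 1' (both sides nonnegative here);
-- both indexed accesses are in range under the guard, and 's[i] + s[i+1]' (two 1-char strings) is String.ofList [a, b].
def chLoopA (cs : List Char) (i : Nat) (acc : List String) : List String :=
  if h : i + 1 < cs.length then
    chLoopA cs (i + 2) (acc ++ [String.ofList [cs[i], cs[i + 1]]])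
  else acc
termination_by cs.length - i

def cipher_handling (cipher_text : String) : List String :=
  chLoopA cipher_text.toList 0 []

-- ===== PORT B =====
-- Source B's zip(it, it) pulls two consecutive characters per tuple from one iterator: structurally,
-- that is pairing the char list two at a time ('a + b' is String.ofList [a, b]).
def pairsB : List Char → List String
  | a :: b :: rest => String.ofList [a, b] :: pairsB rest
  | _ => []

def cipher_handling_alt (cipher_text : String) : List String :=
  pairsB cipher_text.toList

-- ===== PRECONDITION & SPEC =====
def Spec_cipher_handling (cipher_text : String) (out : List String) : Prop := out = cipher_handling_alt cipher_text
instance (cipher_text : String) (out : List String) : Decidable (Spec_cipher_handling cipher_text out) := by unfold Spec_cipher_handling; infer_instance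

-- ===== CLAIM (what is proved, stated in full; the proofs are below) =====
def Claim_equal_cipher_handling : Prop := ∀ (cipher_text : String), Dom_cipher_handling cipher_text → Spec_cipher_handling cipher_text (cipher_handling cipher_text)

-- ===== LEMMAS AND PROOFS =====

theorem pairsB_short (cs : List Char) (h : cs.length ≤ 1) : pairsB cs = [] := by
  match cs, h with
  | [], _ => rfl
  | [a], _ => rfl

theorem chLoopA_eq (cs : List Char) (i : Nat) (acc : List String) :
    chLoopA cs i acc = acc ++ pairsB (cs.drop i) := by
  induction i, acc using chLoopA.induct cs with
  | case1 i acc h ih =>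
    rw [chLoopA, dif_pos h, ih,
        List.drop_eq_getElem_cons (by omega : i < cs.length),
        List.drop_eq_getElem_cons (by omega : i + 1 < cs.length)]
    simp [pairsB]
  | case2 i acc h =>
    rw [chLoopA, dif_neg h, pairsB_short _ (by simp; omega)]
    simp

-- ===== VERDICT (by name: the statement is the Claim_ definition above) =====
theorem cipher_handling_spec : Claim_equal_cipher_handling := by
  intro s _
  show chLoopA s.toList 0 [] = pairsB s.toList
  rw [chLoopA_eq]
  simp
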